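-- pv_equiv track=rewrite | github.com/chrisglencross/advent-of-code | aoc2020/day20/day20.py | get_blank_spaces
-- ===== SOURCE A (Python) =====
-- from math import isqrt
--
-- def get_blank_spaces(board, tile_count):
--     (min_x, min_y), (max_x, max_y) = get_bounds(board)
--     board_size = isqrt(tile_count)
--     if max_x - min_x < board_size:
--         min_x -= 1
--         max_x += 1
--     if max_y - min_y < board_size:
--         min_y -= 1
--         max_y += 1
--     result = []
--     for y in range(min_y, max_y):
--         for x in range(min_x, max_x):
--             if (x, y) not in board.keys() and (
--                     (x + 1, y) in board.keys() or
--                     (x - 1, y) in board.keys() or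
--                     (x, y + 1) in board.keys() or
--                     (x, y - 1) in board.keys()
--             ):
--                 result.append((x, y))
--     return result
--
-- def get_bounds(board):
--     min_x = min([x for x, y in board.keys()])
--     max_x = max([x for x, y in board.keys()]) + 1
--     min_y = min([y for x, y in board.keys()])
--     max_y = max([y for x, y in board.keys()]) + 1
--     return (min_x, min_y), (max_x, max_y)
-- ===== SOURCE B (Python) =====
-- from math import isqrt
--
-- def get_blank_spaces(board, tile_count):
--     (min_x, min_y), (max_x, max_y) = get_bounds(board)
--     board_size = isqrt(tile_count)
--     if max_x - min_x < board_size: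
--         min_x -= 1
--         max_x += 1
--     if max_y - min_y < board_size:
--         min_y -= 1
--         max_y += 1
--     candidates = set()
--     for ox, oy in board.keys():
--         for nx, ny in ((ox + 1, oy), (ox - 1, oy), (ox, oy + 1), (ox, oy - 1)):
--             if (nx, ny) not in board and min_x <= nx < max_x and min_y <= ny < max_y:
--                 candidates.add((nx, ny))
--     return sorted(candidates, key=lambda p: (p[1], p[0]))
--
-- def get_bounds(board):
--     min_x = min([x for x, y in board.keys()])
--     max_x = max([x for x, y in board.keys()]) + 1
--     min_y = min([y for x, y in board.keys()])
--     max_y = max([y for x, y in board.keys()]) + 1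
--     return (min_x, min_y), (max_x, max_y)
-- ===== Notes on version B (the rewrite author's own statement) =====
-- stated objective: alternative
-- what changed: Instead of scanning every cell of the expanded bounding box and testing four memberships per cell, B makes one pass over the occupied cells, collects their blank in-bounds neighbours into a set, and returns them sorted by (y, x).
import Mathlib
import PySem

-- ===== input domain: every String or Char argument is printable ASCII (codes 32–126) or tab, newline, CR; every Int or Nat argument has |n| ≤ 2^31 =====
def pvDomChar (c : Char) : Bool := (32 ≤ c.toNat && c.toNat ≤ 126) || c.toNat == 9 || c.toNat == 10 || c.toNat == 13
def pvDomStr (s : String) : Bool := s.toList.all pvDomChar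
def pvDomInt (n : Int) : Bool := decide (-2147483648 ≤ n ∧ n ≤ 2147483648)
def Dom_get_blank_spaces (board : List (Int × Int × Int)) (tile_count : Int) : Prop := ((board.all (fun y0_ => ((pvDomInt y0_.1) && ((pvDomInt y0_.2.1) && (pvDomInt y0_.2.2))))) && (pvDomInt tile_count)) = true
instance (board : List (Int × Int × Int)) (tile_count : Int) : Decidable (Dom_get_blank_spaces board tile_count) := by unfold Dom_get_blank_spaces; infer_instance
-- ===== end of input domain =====

-- B replaces A's scan of the whole expanded grid by one pass over the occupied
-- cells that collects their blank in-bounds neighbours into a set, sorted by (y, x)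
-- at the end (objective: alternative algorithm; does not scan the grid).

-- ===== PORT A =====
-- board is dict[(x,y)] -> int flattened to triples (x, y, v); its key list:
def pv_keys (board : List (Int × Int × Int)) : List (Int × Int) :=
  board.map (fun e => (e.1, e.2.1))

-- helper get_bounds of the module (min/max raise on an empty board: Pre_ excludes it)
def pv_get_bounds (board : List (Int × Int × Int)) : (Int × Int) × (Int × Int) :=
  let min_x := (PySem.List.min? ((pv_keys board).map (fun k => k.1)) (fun v => v)).getD 0
  let max_x := (PySem.List.max? ((pv_keys board).map (fun k => k.1)) (fun v => v)).getD 0 + 1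
  let min_y := (PySem.List.min? ((pv_keys board).map (fun k => k.2)) (fun v => v)).getD 0
  let max_y := (PySem.List.max? ((pv_keys board).map (fun k => k.2)) (fun v => v)).getD 0 + 1
  ((min_x, min_y), (max_x, max_y))

-- math.isqrt, exact for 0 ≤ n (Pre_ excludes negative tile_count, where Python raises)
def pv_isqrt (n : Int) : Int := (Nat.sqrt n.toNat : Int)

def get_blank_spaces (board : List (Int × Int × Int)) (tile_count : Int) : List (Int × Int) :=
  let b := pv_get_bounds board
  let board_size := pv_isqrt tile_count
  let xb := if b.2.1 - b.1.1 < board_size then (b.1.1 - 1, b.2.1 + 1) else (b.1.1, b.2.1)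
  let yb := if b.2.2 - b.1.2 < board_size then (b.1.2 - 1, b.2.2 + 1) else (b.1.2, b.2.2)
  let keys := pv_keys board
  (PySem.List.pyRange yb.1 yb.2 1).foldl (fun acc y =>
    (PySem.List.pyRange xb.1 xb.2 1).foldl (fun acc x =>
      if (x, y) ∉ keys ∧ ((x + 1, y) ∈ keys ∨ (x - 1, y) ∈ keys ∨ (x, y + 1) ∈ keys ∨ (x, y - 1) ∈ keys)
      then acc ++ [(x, y)] else acc) acc) []

-- ===== PORT B =====
def get_blank_spaces_alt (board : List (Int × Int × Int)) (tile_count : Int) : List (Int × Int) :=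
  let b := pv_get_bounds board
  let board_size := pv_isqrt tile_count
  let xb := if b.2.1 - b.1.1 < board_size then (b.1.1 - 1, b.2.1 + 1) else (b.1.1, b.2.1)
  let yb := if b.2.2 - b.1.2 < board_size then (b.1.2 - 1, b.2.2 + 1) else (b.1.2, b.2.2)
  let keys := pv_keys board
  let candidates : PySem.Set (Int × Int) :=
    keys.foldl (fun cs k =>
      [(k.1 + 1, k.2), (k.1 - 1, k.2), (k.1, k.2 + 1), (k.1, k.2 - 1)].foldl (fun cs n =>
        if n ∉ keys ∧ xb.1 ≤ n.1 ∧ n.1 < xb.2 ∧ yb.1 ≤ n.2 ∧ n.2 < yb.2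
        then PySem.Set.add cs n else cs) cs) PySem.Set.empty
  PySem.List.sorted2 candidates (fun p => p.2) (fun p => p.1)

-- ===== PRECONDITION & SPEC =====
-- Pre_ excludes exactly the inputs where the Python A raises: an empty board
-- (min() of an empty list, ValueError) and a negative tile_count (isqrt, ValueError).
def Pre_get_blank_spaces (board : List (Int × Int × Int)) (tile_count : Int) : Prop :=
  board ≠ [] ∧ 0 ≤ tile_count
instance (board : List (Int × Int × Int)) (tile_count : Int) : Decidable (Pre_get_blank_spaces board tile_count) := by unfold Pre_get_blank_spaces; infer_instance

def pvWitness_get_blank_spaces : (List (Int × Int × Int)) × Int := ([(0, 0, 7), (1, 0, 3)], 4)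

def Spec_get_blank_spaces (board : List (Int × Int × Int)) (tile_count : Int) (out : List (Int × Int)) : Prop := out = get_blank_spaces_alt board tile_count
instance (board : List (Int × Int × Int)) (tile_count : Int) (out : List (Int × Int)) : Decidable (Spec_get_blank_spaces board tile_count out) := by unfold Spec_get_blank_spaces; infer_instance

-- ===== CLAIM (what is proved, stated in full; the proofs are below) =====
def Claim_equal_get_blank_spaces : Prop := ∀ (board : List (Int × Int × Int)) (tile_count : Int), Dom_get_blank_spaces board tile_count → Pre_get_blank_spaces board tile_count → Spec_get_blank_spaces board tile_count (get_blank_spaces board tile_count)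

-- ===== LEMMAS AND PROOFS =====

-- the four orthogonal neighbours of a cell
def pvNbrs (k : Int × Int) : List (Int × Int) :=
  [(k.1 + 1, k.2), (k.1 - 1, k.2), (k.1, k.2 + 1), (k.1, k.2 - 1)]

theorem pv_mem_nbrs_comm (c k : Int × Int) : c ∈ pvNbrs k ↔ k ∈ pvNbrs c := by
  obtain ⟨cx, cy⟩ := c; obtain ⟨kx, ky⟩ := k
  simp [pvNbrs, Prod.ext_iff]
  omega

theorem pv_mem_inner_fold (K : List (Int × Int)) (mnx mxx mny mxy : Int)
    (ns : List (Int × Int)) (cs : List (Int × Int)) (c : Int × Int) :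
    c ∈ ns.foldl (fun cs n =>
        if n ∉ K ∧ mnx ≤ n.1 ∧ n.1 < mxx ∧ mny ≤ n.2 ∧ n.2 < mxy
        then PySem.Set.add cs n else cs) cs ↔
      c ∈ cs ∨ (c ∈ ns ∧ c ∉ K ∧ mnx ≤ c.1 ∧ c.1 < mxx ∧ mny ≤ c.2 ∧ c.2 < mxy) := by
  induction ns generalizing cs with
  | nil => simp
  | cons n t ih =>
    simp only [List.foldl_cons, ih, List.mem_cons]
    split
    · rename_i h
      simp only [PySem.Set.mem_add]
      constructor
      · rintro ((h1 | rfl) | h2)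
        · exact Or.inl h1
        · exact Or.inr ⟨Or.inl rfl, h⟩
        · exact Or.inr ⟨Or.inr h2.1, h2.2⟩
      · rintro (h1 | ⟨rfl | h2, h3⟩)
        · exact Or.inl (Or.inl h1)
        · exact Or.inl (Or.inr rfl)
        · exact Or.inr ⟨h2, h3⟩
    · rename_i h
      constructor
      · rintro (h1 | h2)
        · exact Or.inl h1
        · exact Or.inr ⟨Or.inr h2.1, h2.2⟩
      · rintro (h1 | ⟨rfl | h2, h3⟩)
        · exact Or.inl h1
        · exact absurd h3 h
        · exact Or.inr ⟨h2, h3⟩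

theorem pv_nodup_inner_fold (K : List (Int × Int)) (mnx mxx mny mxy : Int)
    (ns : List (Int × Int)) (cs : List (Int × Int)) (h : cs.Nodup) :
    (ns.foldl (fun cs n =>
        if n ∉ K ∧ mnx ≤ n.1 ∧ n.1 < mxx ∧ mny ≤ n.2 ∧ n.2 < mxy
        then PySem.Set.add cs n else cs) cs).Nodup := by
  induction ns generalizing cs with
  | nil => exact h
  | cons n t ih =>
    simp only [List.foldl_cons]
    split
    · exact ih _ (PySem.Set.nodup_add _ _ h)
    · exact ih _ h

theorem pv_mem_cand (K : List (Int × Int)) (mnx mxx mny mxy : Int)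
    (ks : List (Int × Int)) (cs : List (Int × Int)) (c : Int × Int) :
    c ∈ ks.foldl (fun cs k => (pvNbrs k).foldl (fun cs n =>
        if n ∉ K ∧ mnx ≤ n.1 ∧ n.1 < mxx ∧ mny ≤ n.2 ∧ n.2 < mxy
        then PySem.Set.add cs n else cs) cs) cs ↔
      c ∈ cs ∨ ((∃ k ∈ ks, c ∈ pvNbrs k) ∧ c ∉ K ∧ mnx ≤ c.1 ∧ c.1 < mxx ∧ mny ≤ c.2 ∧ c.2 < mxy) := by
  induction ks generalizing cs with
  | nil => simp
  | cons k t ih =>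
    simp only [List.foldl_cons, ih, pv_mem_inner_fold, List.mem_cons]
    constructor
    · rintro ((h | h) | h)
      · exact Or.inl h
      · exact Or.inr ⟨⟨k, Or.inl rfl, h.1⟩, h.2⟩
      · obtain ⟨⟨k', hk', hn⟩, hrest⟩ := h
        exact Or.inr ⟨⟨k', Or.inr hk', hn⟩, hrest⟩
    · rintro (h | ⟨⟨k', (hk' | hk'), hn⟩, hrest⟩)
      · exact Or.inl (Or.inl h)
      · subst hk'; exact Or.inl (Or.inr ⟨hn, hrest⟩)
      · exact Or.inr ⟨⟨k', hk', hn⟩, hrest⟩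

theorem pv_nodup_cand (K : List (Int × Int)) (mnx mxx mny mxy : Int)
    (ks : List (Int × Int)) (cs : List (Int × Int)) (h : cs.Nodup) :
    (ks.foldl (fun cs k => (pvNbrs k).foldl (fun cs n =>
        if n ∉ K ∧ mnx ≤ n.1 ∧ n.1 < mxx ∧ mny ≤ n.2 ∧ n.2 < mxy
        then PySem.Set.add cs n else cs) cs) cs).Nodup := by
  induction ks generalizing cs with
  | nil => exact h
  | cons k t ih => exact ih _ (pv_nodup_inner_fold _ _ _ _ _ _ _ h)

-- A's nested loop as a flatMap of filtered rows
def pvRow (K : List (Int × Int)) (mnx mxx : Int) (y : Int) : List (Int × Int) :=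
  ((PySem.List.pyRange mnx mxx 1).filter (fun x => decide ((x, y) ∉ K ∧
    ((x + 1, y) ∈ K ∨ (x - 1, y) ∈ K ∨ (x, y + 1) ∈ K ∨ (x, y - 1) ∈ K)))).map (fun x => (x, y))

def pvL (K : List (Int × Int)) (mnx mxx mny mxy : Int) : List (Int × Int) :=
  (PySem.List.pyRange mny mxy 1).flatMap (pvRow K mnx mxx)

theorem pv_A_eq_L (K : List (Int × Int)) (mnx mxx mny mxy : Int) :
    (PySem.List.pyRange mny mxy 1).foldl (fun acc y =>
      (PySem.List.pyRange mnx mxx 1).foldl (fun acc x =>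
        if (x, y) ∉ K ∧ ((x + 1, y) ∈ K ∨ (x - 1, y) ∈ K ∨ (x, y + 1) ∈ K ∨ (x, y - 1) ∈ K)
        then acc ++ [(x, y)] else acc) acc) [] = pvL K mnx mxx mny mxy := by
  have hinner : ∀ (y : Int) (acc : List (Int × Int)),
      (PySem.List.pyRange mnx mxx 1).foldl (fun acc x =>
        if (x, y) ∉ K ∧ ((x + 1, y) ∈ K ∨ (x - 1, y) ∈ K ∨ (x, y + 1) ∈ K ∨ (x, y - 1) ∈ K)
        then acc ++ [(x, y)] else acc) acc = acc ++ pvRow K mnx mxx y := by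
    intro y acc
    exact PySem.List.foldl_append_ite _ _ _ _
  calc (PySem.List.pyRange mny mxy 1).foldl (fun acc y =>
        (PySem.List.pyRange mnx mxx 1).foldl (fun acc x =>
          if (x, y) ∉ K ∧ ((x + 1, y) ∈ K ∨ (x - 1, y) ∈ K ∨ (x, y + 1) ∈ K ∨ (x, y - 1) ∈ K)
          then acc ++ [(x, y)] else acc) acc) []
      = (PySem.List.pyRange mny mxy 1).foldl (fun acc y => acc ++ pvRow K mnx mxx y) [] := by
        apply PySem.List.foldl_congr_mem
        intro acc y _
        exact hinner y acc
    _ = pvL K mnx mxx mny mxy := by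
        rw [PySem.List.foldl_append_eq_flatMap]; rfl

theorem pv_mem_L (K : List (Int × Int)) (mnx mxx mny mxy : Int) (c : Int × Int) :
    c ∈ pvL K mnx mxx mny mxy ↔
      (mnx ≤ c.1 ∧ c.1 < mxx ∧ mny ≤ c.2 ∧ c.2 < mxy) ∧ c ∉ K ∧
      ((c.1 + 1, c.2) ∈ K ∨ (c.1 - 1, c.2) ∈ K ∨ (c.1, c.2 + 1) ∈ K ∨ (c.1, c.2 - 1) ∈ K) := by
  obtain ⟨cx, cy⟩ := c
  simp only [pvL, pvRow, List.mem_flatMap, List.mem_map, List.mem_filter,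
    PySem.List.mem_pyRange_one, decide_eq_true_eq, Prod.mk.injEq]
  constructor
  · rintro ⟨y, hy, x, ⟨⟨hx1, hx2⟩, hc⟩, hxx, hyy⟩
    subst hxx; subst hyy
    exact ⟨⟨hx1, hx2, hy.1, hy.2⟩, hc⟩
  · rintro ⟨⟨h1, h2, h3, h4⟩, hc⟩
    exact ⟨cy, ⟨h3, h4⟩, cx, ⟨⟨h1, h2⟩, hc⟩, rfl, rfl⟩

theorem pv_row_snd (K : List (Int × Int)) (mnx mxx : Int) (y : Int) (c : Int × Int)
    (h : c ∈ pvRow K mnx mxx y) : c.2 = y := by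
  simp only [pvRow, List.mem_map, List.mem_filter] at h
  obtain ⟨x, _, rfl⟩ := h
  rfl

theorem pv_row_pairwise (K : List (Int × Int)) (mnx mxx : Int) (y : Int) :
    (pvRow K mnx mxx y).Pairwise (fun a b => toLex (a.2, a.1) < toLex (b.2, b.1)) := by
  unfold pvRow
  rw [List.pairwise_map]
  apply List.Pairwise.filter
  apply (PySem.List.pairwise_lt_pyRange_one mnx mxx).imp
  intro a b hab
  exact Prod.Lex.lt_iff.mpr (Or.inr ⟨rfl, hab⟩)

theorem pv_pairwise_flat (K : List (Int × Int)) (mnx mxx : Int) (ys : List Int)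
    (hys : ys.Pairwise (· < ·)) :
    (ys.flatMap (pvRow K mnx mxx)).Pairwise (fun a b => toLex (a.2, a.1) < toLex (b.2, b.1)) := by
  induction ys with
  | nil => simp
  | cons y t ih =>
    rw [List.pairwise_cons] at hys
    rw [List.flatMap_cons]
    rw [List.pairwise_append]
    refine ⟨pv_row_pairwise K mnx mxx y, ih hys.2, ?_⟩
    intro a ha b hb
    have ha2 : a.2 = y := pv_row_snd K mnx mxx y a ha
    simp only [List.mem_flatMap] at hb
    obtain ⟨y', hy', hb'⟩ := hb
    have hb2 : b.2 = y' := pv_row_snd K mnx mxx y' b hb'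
    exact Prod.Lex.lt_iff.mpr (Or.inl (by rw [ha2, hb2]; exact hys.1 y' hy'))

theorem pv_pairwise_L (K : List (Int × Int)) (mnx mxx mny mxy : Int) :
    (pvL K mnx mxx mny mxy).Pairwise (fun a b =>
      toLex (a.2, a.1) < toLex (b.2, b.1)) :=
  pv_pairwise_flat K mnx mxx _ (PySem.List.pairwise_lt_pyRange_one mny mxy)

theorem pv_nodup_L (K : List (Int × Int)) (mnx mxx mny mxy : Int) :
    (pvL K mnx mxx mny mxy).Nodup := by
  have h := pv_pairwise_L K mnx mxx mny mxy
  exact h.imp (fun {a b} hab => by intro he; subst he; exact lt_irrefl _ hab)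

theorem pv_sorted2_eq_sorted_lex (xs : List (Int × Int)) :
    PySem.List.sorted2 xs (fun p => p.2) (fun p => p.1) =
      PySem.List.sorted xs (fun p => toLex (p.2, p.1)) := by
  unfold PySem.List.sorted2 PySem.List.sorted
  have hb : (fun (a b : Int × Int) => decide (a.2 < b.2) || (!decide (b.2 < a.2) && decide (a.1 < b.1)))
      = fun (a b : Int × Int) => decide (toLex (a.2, a.1) < toLex (b.2, b.1)) := by
    funext a b
    by_cases h1 : a.2 < b.2 <;> by_cases h2 : b.2 < a.2 <;> by_cases h3 : a.1 < b.1 <;>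
      simp [h1, h2, h3, Prod.Lex.lt_iff] <;> omega
  simp only [Bool.false_eq_true, if_false, hb]

-- the main combinatorial identity, with bounds and key list abstracted
theorem pv_main (K : List (Int × Int)) (mnx mxx mny mxy : Int) :
    (PySem.List.pyRange mny mxy 1).foldl (fun acc y =>
      (PySem.List.pyRange mnx mxx 1).foldl (fun acc x =>
        if (x, y) ∉ K ∧ ((x + 1, y) ∈ K ∨ (x - 1, y) ∈ K ∨ (x, y + 1) ∈ K ∨ (x, y - 1) ∈ K)
        then acc ++ [(x, y)] else acc) acc) [] =
    PySem.List.sorted2 (K.foldl (fun cs k => (pvNbrs k).foldl (fun cs n =>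
        if n ∉ K ∧ mnx ≤ n.1 ∧ n.1 < mxx ∧ mny ≤ n.2 ∧ n.2 < mxy
        then PySem.Set.add cs n else cs) cs) PySem.Set.empty)
      (fun p => p.2) (fun p => p.1) := by
  rw [pv_A_eq_L, pv_sorted2_eq_sorted_lex]
  have hmem : ∀ c, c ∈ pvL K mnx mxx mny mxy ↔
      c ∈ K.foldl (fun cs k => (pvNbrs k).foldl (fun cs n =>
        if n ∉ K ∧ mnx ≤ n.1 ∧ n.1 < mxx ∧ mny ≤ n.2 ∧ n.2 < mxy
        then PySem.Set.add cs n else cs) cs) PySem.Set.empty := by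
    intro c
    rw [pv_mem_L, pv_mem_cand]
    have hn : (∃ k ∈ K, c ∈ pvNbrs k) ↔
        ((c.1 + 1, c.2) ∈ K ∨ (c.1 - 1, c.2) ∈ K ∨ (c.1, c.2 + 1) ∈ K ∨ (c.1, c.2 - 1) ∈ K) := by
      constructor
      · rintro ⟨k, hk, hc⟩
        have hkc := (pv_mem_nbrs_comm c k).mp hc
        simp only [pvNbrs, List.mem_cons, List.not_mem_nil, or_false] at hkc
        rcases hkc with h | h | h | h <;> rw [h] at hk <;> tauto
      · intro h
        rcases h with h | h | h | h
        · exact ⟨_, h, by simp [pvNbrs, Prod.ext_iff]⟩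
        · exact ⟨_, h, by simp [pvNbrs, Prod.ext_iff]⟩
        · exact ⟨_, h, by simp [pvNbrs, Prod.ext_iff]⟩
        · exact ⟨_, h, by simp [pvNbrs, Prod.ext_iff]⟩
    simp only [PySem.Set.empty, List.not_mem_nil, false_or, hn]
    tauto
  have hperm : (pvL K mnx mxx mny mxy).Perm
      (K.foldl (fun cs k => (pvNbrs k).foldl (fun cs n =>
        if n ∉ K ∧ mnx ≤ n.1 ∧ n.1 < mxx ∧ mny ≤ n.2 ∧ n.2 < mxy
        then PySem.Set.add cs n else cs) cs) PySem.Set.empty) := by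
    refine (List.perm_ext_iff_of_nodup (pv_nodup_L K mnx mxx mny mxy) ?_).mpr hmem
    exact pv_nodup_cand K mnx mxx mny mxy K PySem.Set.empty List.nodup_nil
  exact (PySem.List.sorted_eq_of_perm_of_pairwise_lt _ _ _ hperm
    (pv_pairwise_L K mnx mxx mny mxy)).symm

-- ===== VERDICT (by name: the statement is the Claim_ definition above) =====
theorem get_blank_spaces_spec : Claim_equal_get_blank_spaces := by
  intro board tile_count _ _
  unfold Spec_get_blank_spaces get_blank_spaces get_blank_spaces_alt
  simp only []
  exact pv_main _ _ _ _ _
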